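-- pv_equiv track=rewrite | github.com/Enjef/Algo | 1300 - 1399/1385 - Find the Distance Value Between Two Arrays/1385 - Find the Distance Value Between Two Arrays.py | findTheDistanceValue_3d_best_speed
-- ===== SOURCE A (Python) =====
-- def findTheDistanceValue_3d_best_speed(arr1, arr2, d):
--     arr1.sort()
--     arr2.sort()
--     i = 0
--     j = 0
--     dist = 0
--     while i < len(arr1) and j < len(arr2):
--         if arr1[i] >= arr2[j]:
--             if arr1[i] - arr2[j] > d:
--                 j += 1
--             else:
--                 i += 1
--         else:
--             if arr2[j] - arr1[i] > d:
--                 i += 1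
--                 dist += 1
--             else:
--                 i += 1
--     dist += len(arr1) - i
--     return dist
-- ===== SOURCE B (Python) =====
-- def findTheDistanceValue_3d_best_speed(arr1, arr2, d):
--     arr1.sort()
--     arr2.sort()
--     return sum(1 for x in arr1 if all(abs(x - y) > d for y in arr2))
-- ===== Notes on version B (the rewrite author's own statement) =====
-- stated objective: simpler
-- what changed: Replaces A's merge-style two-pointer sweep over the two sorted arrays with a direct nested count (sum of arr1 elements whose distance to every arr2 element exceeds d); the in-place sorts are kept so both arguments are mutated exactly as A mutates them.
import Mathlib
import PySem

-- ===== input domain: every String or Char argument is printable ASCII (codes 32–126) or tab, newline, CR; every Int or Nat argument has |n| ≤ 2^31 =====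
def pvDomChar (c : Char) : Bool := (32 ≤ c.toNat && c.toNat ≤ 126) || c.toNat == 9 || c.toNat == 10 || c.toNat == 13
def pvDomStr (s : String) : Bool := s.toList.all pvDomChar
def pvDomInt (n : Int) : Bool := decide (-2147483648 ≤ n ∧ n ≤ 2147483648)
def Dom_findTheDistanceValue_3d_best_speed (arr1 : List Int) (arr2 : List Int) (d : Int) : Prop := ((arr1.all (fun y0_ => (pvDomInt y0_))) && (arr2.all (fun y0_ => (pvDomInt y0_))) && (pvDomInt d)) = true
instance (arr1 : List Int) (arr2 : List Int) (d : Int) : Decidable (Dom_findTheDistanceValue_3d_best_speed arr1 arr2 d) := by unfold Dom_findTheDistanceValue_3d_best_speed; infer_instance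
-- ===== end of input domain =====

-- B replaces A's merge-style two-pointer sweep over the two sorted arrays by a direct
-- nested count (each arr1 element checked against all of arr2); objective: simpler.
-- Both A and B sort their list arguments in place in Python; the equivalence proved
-- here is about the return value only (B performs the same mutation).

-- ===== PORT A =====
-- the while-loop of A, step for step; i, j, dist are the loop state
def pvLoopA (s1 s2 : List Int) (d : Int) (i j : Nat) (dist : Int) : Int :=
  if _h : i < s1.length ∧ j < s2.length then
    if s1.getD i 0 ≥ s2.getD j 0 then
      if s1.getD i 0 - s2.getD j 0 > d then pvLoopA s1 s2 d i (j+1) dist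
      else pvLoopA s1 s2 d (i+1) j dist
    else
      if s2.getD j 0 - s1.getD i 0 > d then pvLoopA s1 s2 d (i+1) j (dist+1)
      else pvLoopA s1 s2 d (i+1) j dist
  else dist + ((s1.length : Int) - (i : Int))
termination_by (s1.length - i) + (s2.length - j)
decreasing_by all_goals omega

def findTheDistanceValue_3d_best_speed (arr1 : List Int) (arr2 : List Int) (d : Int) : Int :=
  let s1 := PySem.List.sorted arr1 (fun x => x) false
  let s2 := PySem.List.sorted arr2 (fun x => x) false
  pvLoopA s1 s2 d 0 0 0

-- ===== PORT B =====
def findTheDistanceValue_3d_best_speed_alt (arr1 : List Int) (arr2 : List Int) (d : Int) : Int :=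
  let s1 := PySem.List.sorted arr1 (fun x => x) false
  let s2 := PySem.List.sorted arr2 (fun x => x) false
  s1.foldl (fun acc x => if s2.all (fun y => decide (d < |x - y|)) then acc + 1 else acc) 0

-- ===== PRECONDITION & SPEC =====
def Spec_findTheDistanceValue_3d_best_speed (arr1 : List Int) (arr2 : List Int) (d : Int) (out : Int) : Prop := out = findTheDistanceValue_3d_best_speed_alt arr1 arr2 d
instance (arr1 : List Int) (arr2 : List Int) (d : Int) (out : Int) : Decidable (Spec_findTheDistanceValue_3d_best_speed arr1 arr2 d out) := by unfold Spec_findTheDistanceValue_3d_best_speed; infer_instance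

-- ===== CLAIM (what is proved, stated in full; the proofs are below) =====
def Claim_equal_findTheDistanceValue_3d_best_speed : Prop := ∀ (arr1 : List Int) (arr2 : List Int) (d : Int), Dom_findTheDistanceValue_3d_best_speed arr1 arr2 d → Spec_findTheDistanceValue_3d_best_speed arr1 arr2 d (findTheDistanceValue_3d_best_speed arr1 arr2 d)

-- ===== LEMMAS AND PROOFS =====

-- "x is farther than d from every element of s2"
def pvFar (s2 : List Int) (d : Int) (x : Int) : Bool :=
  s2.all (fun y => decide (d < |x - y|))

lemma pvFar_iff (s2 : List Int) (d x : Int) :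
    pvFar s2 d x = true ↔ ∀ y ∈ s2, d < |x - y| := by
  simp [pvFar]

-- B's fold is a count of far elements
lemma foldl_count (s2 : List Int) (d : Int) : ∀ (s1 : List Int) (acc : Int),
    s1.foldl (fun acc x => if s2.all (fun y => decide (d < |x - y|)) then acc + 1 else acc) acc
      = acc + (s1.countP (pvFar s2 d) : Int) := by
  intro s1
  induction s1 with
  | nil => intro acc; simp only [List.foldl_nil, List.countP_nil]; push_cast; ring
  | cons x t ih =>
      intro acc
      simp only [List.foldl_cons, List.countP_cons, pvFar, ih]
      split_ifs with h
      · push_cast; ring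
      · simp

-- the two-pointer sweep counts exactly the far elements of the remaining suffix
lemma loopA_eq (s1 s2 : List Int) (d : Int) : ∀ i j (dist : Int),
    s1.Pairwise (· ≤ ·) → s2.Pairwise (· ≤ ·) →
    i ≤ s1.length → j ≤ s2.length →
    (∀ l, l < j → ∀ k, i ≤ k → k < s1.length → d < s1.getD k 0 - s2.getD l 0) →
    pvLoopA s1 s2 d i j dist = dist + ((s1.drop i).countP (pvFar s2 d) : Int) := by
  intro i j dist hs1 hs2 hi hj hinv
  rw [pvLoopA]
  have hget1 : ∀ k (h : k < s1.length), s1.getD k 0 = s1[k] := fun k h => List.getD_eq_getElem _ _ h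
  have hget2 : ∀ k (h : k < s2.length), s2.getD k 0 = s2[k] := fun k h => List.getD_eq_getElem _ _ h
  have hmono1 : ∀ p q (hp : p ≤ q) (hq : q < s1.length), s1[p]'(by omega) ≤ s1[q] := by
    intro p q hp hq
    rcases Nat.lt_or_ge p q with h | h
    · exact (List.pairwise_iff_getElem.mp hs1) p q (by omega) hq h
    · have : p = q := by omega
      subst this; exact le_refl _
  have hmono2 : ∀ p q (hp : p ≤ q) (hq : q < s2.length), s2[p]'(by omega) ≤ s2[q] := by
    intro p q hp hq
    rcases Nat.lt_or_ge p q with h | h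
    · exact (List.pairwise_iff_getElem.mp hs2) p q (by omega) hq h
    · have : p = q := by omega
      subst this; exact le_refl _
  split_ifs with hc h1 h2 h3
  · -- s1[i] ≥ s2[j], gap > d : j := j+1
    obtain ⟨hin, hjn⟩ := hc
    rw [loopA_eq s1 s2 d i (j+1) dist hs1 hs2 hi (by omega) ?_]
    intro l hl k hk1 hk2
    rcases Nat.lt_or_ge l j with hlj | hlj
    · exact hinv l hlj k hk1 hk2
    · have hlj' : l = j := by omega
      rw [hlj']
      have := hmono1 i k hk1 hk2
      rw [hget1 k hk2, hget2 j hjn]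
      rw [hget1 i hin, hget2 j hjn] at h2
      omega
  · -- s1[i] ≥ s2[j], gap ≤ d : i := i+1, not far
    obtain ⟨hin, hjn⟩ := hc
    rw [loopA_eq s1 s2 d (i+1) j dist hs1 hs2 (by omega) hj
        (fun l hl k hk1 hk2 => hinv l hl k (by omega) hk2)]
    rw [List.drop_eq_getElem_cons hin, List.countP_cons]
    have hnot : pvFar s2 d (s1[i]) = false := by
      rw [Bool.eq_false_iff]
      intro hfar
      have := (pvFar_iff s2 d _).mp hfar (s2[j]) (List.getElem_mem hjn)
      rw [hget1 i hin, hget2 j hjn] at h1 h2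
      rw [abs_of_nonneg (by omega)] at this
      omega
    simp [hnot]
  · -- s1[i] < s2[j], gap > d : counted
    obtain ⟨hin, hjn⟩ := hc
    rw [loopA_eq s1 s2 d (i+1) j (dist+1) hs1 hs2 (by omega) hj
        (fun l hl k hk1 hk2 => hinv l hl k (by omega) hk2)]
    rw [List.drop_eq_getElem_cons hin, List.countP_cons]
    have hfar : pvFar s2 d (s1[i]) = true := by
      rw [pvFar_iff]
      intro y hy
      obtain ⟨l, hl, rfl⟩ := List.getElem_of_mem hy
      rcases Nat.lt_or_ge l j with hlj | hlj
      · have h5 := hinv l hlj i (le_refl _) hin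
        rw [hget1 i hin, hget2 l hl] at h5
        have h6 := le_abs_self (s1[i] - s2[l])
        omega
      · have h5 := hmono2 j l hlj hl
        rw [hget1 i hin, hget2 j hjn] at h3
        have h6 := neg_abs_le (s1[i] - s2[l])
        omega
    simp only [hfar, if_pos]
    push_cast
    ring
  · -- s1[i] < s2[j], gap ≤ d : not far
    obtain ⟨hin, hjn⟩ := hc
    rw [loopA_eq s1 s2 d (i+1) j dist hs1 hs2 (by omega) hj
        (fun l hl k hk1 hk2 => hinv l hl k (by omega) hk2)]
    rw [List.drop_eq_getElem_cons hin, List.countP_cons]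
    have hnot : pvFar s2 d (s1[i]) = false := by
      rw [Bool.eq_false_iff]
      intro hfar
      have := (pvFar_iff s2 d _).mp hfar (s2[j]) (List.getElem_mem hjn)
      rw [hget1 i hin, hget2 j hjn] at h1 h3
      rw [abs_of_nonpos (by omega)] at this
      omega
    simp [hnot]
  · -- loop exit
    rcases Nat.lt_or_ge i s1.length with hin | hin
    · -- j = s2.length : every remaining element is far
      have hjm : j = s2.length := by omega
      have hall : ∀ x ∈ s1.drop i, pvFar s2 d x = true := by
        intro x hx
        obtain ⟨k, hk, rfl⟩ := List.getElem_of_mem hx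
        have hik : i + k < s1.length := by
          rw [List.length_drop] at hk; omega
        rw [List.getElem_drop, pvFar_iff]
        intro y hy
        obtain ⟨l, hl, rfl⟩ := List.getElem_of_mem hy
        have h5 := hinv l (by omega) (i + k) (by omega) hik
        rw [hget1 (i+k) hik, hget2 l hl] at h5
        have h6 := le_abs_self (s1[i + k] - s2[l])
        omega
      rw [List.countP_eq_length.mpr hall, List.length_drop]
      omega
    · have : i = s1.length := by omega
      subst this
      simp
termination_by i j => (s1.length - i) + (s2.length - j)
decreasing_by all_goals omega

-- ===== VERDICT (by name: the statement is the Claim_ definition above) =====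
theorem findTheDistanceValue_3d_best_speed_spec : Claim_equal_findTheDistanceValue_3d_best_speed := by
  intro arr1 arr2 d _
  unfold Spec_findTheDistanceValue_3d_best_speed
  unfold findTheDistanceValue_3d_best_speed findTheDistanceValue_3d_best_speed_alt
  rw [foldl_count]
  rw [loopA_eq _ _ d 0 0 0
      (PySem.List.sorted_pairwise arr1 (fun x => x))
      (PySem.List.sorted_pairwise arr2 (fun x => x))
      (by omega) (by omega) (by intro l hl; omega)]
  simp
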